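-- pv_equiv track=rewrite | github.com/rShar01/TRACE | judge_preference/model.py | get_n_lines
-- ===== SOURCE A (Python) =====
-- def get_n_lines(s, n):
--     lines = s.split('\n')
--     counter = 0
--     ret_lines = []
--     for line in lines:
--         if counter >= n:
--             return ret_lines
--
--         # has characters
--         if any(letter.isalnum() for letter in line):
--             counter += 1
--
--         ret_lines.append(line)
--
--     return ret_lines
-- ===== SOURCE B (Python) =====
-- def get_n_lines(s, n):
--     lines = s.split('\n')
--     if n <= 0:
--         return []
--     idxs = [i for i, line in enumerate(lines) if any(c.isalnum() for c in line)]
--     if len(idxs) < n: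
--         return lines
--     return lines[:idxs[n - 1] + 1]
-- ===== Notes on version B (the rewrite author's own statement) =====
-- stated objective: simpler
-- what changed: Replaces the stateful accumulate-and-count loop (with mid-loop early return) by an index table of non-blank line positions followed by a single slice lines[:idxs[n-1]+1].
import Mathlib
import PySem

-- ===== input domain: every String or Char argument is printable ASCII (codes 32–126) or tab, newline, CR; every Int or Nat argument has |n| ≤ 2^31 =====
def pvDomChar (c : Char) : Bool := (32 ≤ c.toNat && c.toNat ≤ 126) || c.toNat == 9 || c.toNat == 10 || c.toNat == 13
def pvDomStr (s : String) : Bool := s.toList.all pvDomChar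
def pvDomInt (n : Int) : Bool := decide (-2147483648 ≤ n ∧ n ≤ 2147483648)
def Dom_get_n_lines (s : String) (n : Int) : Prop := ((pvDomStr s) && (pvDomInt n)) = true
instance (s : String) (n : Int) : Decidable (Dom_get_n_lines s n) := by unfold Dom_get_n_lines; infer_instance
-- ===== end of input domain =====

-- B replaces A's stateful accumulate-and-count loop by an index table of the
-- non-blank line positions followed by a single slice (objective: simpler).

-- ===== PORT A =====
-- any(letter.isalnum() for letter in line)
def pvHasAlnum (line : String) : Bool := line.toList.any PySem.Chars.isalnum

-- the for-loop of A, carrying counter and ret_lines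
def pvLoopA (n : Int) : List String → Int → List String → List String
  | [], _, ret => ret
  | line :: rest, counter, ret =>
    if counter ≥ n then ret
    else pvLoopA n rest (if pvHasAlnum line then counter + 1 else counter) (ret ++ [line])

def get_n_lines (s : String) (n : Int) : List String :=
  pvLoopA n ((PySem.Str.split? s "\n").getD []) 0 []

-- ===== PORT B =====
-- the comprehension [i for i, line in enumerate(lines) if any(c.isalnum() for c in line)]
def pvIdxs (lines : List String) : List Int :=
  ((PySem.List.enumerate lines 0).filter (fun p => pvHasAlnum p.2)).map (·.1)

def get_n_lines_alt (s : String) (n : Int) : List String :=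
  let lines := (PySem.Str.split? s "\n").getD []
  if n ≤ 0 then []
  else
    let idxs := pvIdxs lines
    if (idxs.length : Int) < n then lines
    else PySem.List.slice lines none (some ((PySem.List.pyGet? idxs (n - 1)).getD 0 + 1))

-- ===== PRECONDITION & SPEC =====
def Spec_get_n_lines (s : String) (n : Int) (out : List String) : Prop := out = get_n_lines_alt s n
instance (s : String) (n : Int) (out : List String) : Decidable (Spec_get_n_lines s n out) := by unfold Spec_get_n_lines; infer_instance

-- ===== CLAIM (what is proved, stated in full; the proofs are below) =====
def Claim_equal_get_n_lines : Prop := ∀ (s : String) (n : Int), Dom_get_n_lines s n → Spec_get_n_lines s n (get_n_lines s n)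

-- ===== LEMMAS AND PROOFS =====

-- common specification: keep lines while the budget m of non-blank lines is positive,
-- decrementing it on each non-blank line
def pvSpec : List String → Int → List String
  | [], _ => []
  | l :: rest, m =>
    if m ≤ 0 then [] else l :: pvSpec rest (if pvHasAlnum l then m - 1 else m)

theorem pvSpec_nonpos (ls : List String) (m : Int) (h : m ≤ 0) : pvSpec ls m = [] := by
  cases ls <;> simp [pvSpec, h]

theorem pvLoopA_eq_spec (n : Int) (ls : List String) :
    ∀ (c : Int) (ret : List String), pvLoopA n ls c ret = ret ++ pvSpec ls (n - c) := by
  induction ls with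
  | nil => intro c ret; simp [pvLoopA, pvSpec]
  | cons l rest ih =>
    intro c ret
    by_cases h : c ≥ n
    · simp [pvLoopA, pvSpec, h, show n - c ≤ 0 by omega]
    · simp only [pvLoopA, pvSpec, if_neg h, if_neg (show ¬ n - c ≤ 0 by omega)]
      by_cases hl : pvHasAlnum l
      · rw [if_pos hl, if_pos hl, ih, show n - (c + 1) = n - c - 1 by omega]
        simp
      · rw [if_neg hl, if_neg hl, ih]
        simp

-- idxsFrom with a general start, matching pvIdxs at start 0
def pvIdxsFrom (ls : List String) (s : Int) : List Int :=
  ((PySem.List.enumerate ls s).filter (fun p => pvHasAlnum p.2)).map (·.1)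

theorem pvIdxsFrom_cons (l : String) (rest : List String) (s : Int) :
    pvIdxsFrom (l :: rest) s
      = (if pvHasAlnum l then [s] else []) ++ pvIdxsFrom rest (s + 1) := by
  simp only [pvIdxsFrom, PySem.List.enumerate_cons, List.filter_cons]
  by_cases hl : pvHasAlnum l <;> simp [hl]

theorem pvIdxsFrom_shift (ls : List String) :
    ∀ s : Int, pvIdxsFrom ls s = (pvIdxsFrom ls 0).map (· + s) := by
  induction ls with
  | nil => intro s; simp [pvIdxsFrom]
  | cons l rest ih =>
    intro s
    rw [pvIdxsFrom_cons, pvIdxsFrom_cons]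
    simp only [zero_add]
    rw [ih (s + 1), ih 1]
    simp only [List.map_append, List.map_map]
    congr 1
    · by_cases hl : pvHasAlnum l <;> simp [hl]
    · apply List.map_congr_left
      intro x _
      simp; omega

theorem pvIdxs_cons (l : String) (rest : List String) :
    pvIdxs (l :: rest)
      = (if pvHasAlnum l then [(0 : Int)] else []) ++ (pvIdxs rest).map (· + 1) := by
  have h1 : pvIdxs (l :: rest) = pvIdxsFrom (l :: rest) 0 := rfl
  have h2 : pvIdxs rest = pvIdxsFrom rest 0 := rfl
  rw [h1, pvIdxsFrom_cons, h2, zero_add, pvIdxsFrom_shift rest 1]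

theorem pvIdxs_nonneg (ls : List String) : ∀ x ∈ pvIdxs ls, 0 ≤ x := by
  induction ls with
  | nil => simp [pvIdxs]
  | cons l rest ih =>
    intro x hx
    rw [pvIdxs_cons] at hx
    rcases List.mem_append.mp hx with h | h
    · by_cases hl : pvHasAlnum l <;> simp [hl] at h; omega
    · rcases List.mem_map.mp h with ⟨y, hy, rfl⟩
      have := ih y hy; omega

-- the body of B on an explicit list of lines
def pvAltCore (ls : List String) (n : Int) : List String :=
  if n ≤ 0 then []
  else
    if ((pvIdxs ls).length : Int) < n then ls
    else PySem.List.slice ls none (some ((PySem.List.pyGet? (pvIdxs ls) (n - 1)).getD 0 + 1))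

theorem pvAltCore_eq_spec (ls : List String) : ∀ n : Int, pvAltCore ls n = pvSpec ls n := by
  induction ls with
  | nil =>
    intro n
    by_cases h : n ≤ 0
    · simp [pvAltCore, pvSpec, h]
    · simp [pvAltCore, pvSpec, pvIdxs, h, show (0 : Int) < n by omega]
  | cons l rest ih =>
    intro n
    by_cases h0 : n ≤ 0
    · simp [pvAltCore, pvSpec, h0]
    · simp only [pvAltCore, pvSpec, if_neg h0]
      by_cases hl : pvHasAlnum l
      · rw [if_pos hl]
        have hlen : (pvIdxs (l :: rest)).length = (pvIdxs rest).length + 1 := by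
          rw [pvIdxs_cons, if_pos hl]; simp
        by_cases hn1 : n = 1
        · subst hn1
          rw [if_neg (by push_cast [hlen]; omega)]
          have hg : PySem.List.pyGet? (pvIdxs (l :: rest)) (1 - 1) = some 0 := by
            rw [pvIdxs_cons, if_pos hl,
              show ((1 : Int) - 1) = ((0 : Nat) : Int) by norm_num,
              PySem.List.pyGet?_natCast]
            simp
          rw [hg]
          simp only [Option.getD_some, zero_add]
          rw [show ((1 : Int)) = ((1 : Nat) : Int) by norm_num,
            PySem.List.slice_to_natCast]
          push_cast
          rw [pvSpec_nonpos rest 0 (by omega)]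
          simp
        · -- n ≥ 2
          have hn2 : 2 ≤ n := by omega
          rw [← ih (n - 1)]
          simp only [pvAltCore, if_neg (show ¬ n - 1 ≤ 0 by omega)]
          by_cases hfew : ((pvIdxs rest).length : Int) < n - 1
          · rw [if_pos (by push_cast [hlen]; omega), if_pos hfew]
          · rw [if_neg (by push_cast [hlen]; omega), if_neg hfew]
            -- index into the cons index list
            obtain ⟨k, hk⟩ : ∃ k : Nat, (k : Int) = n - 2 := ⟨(n - 2).toNat, by omega⟩
            have hkr : k < (pvIdxs rest).length := by omega
            have hget : PySem.List.pyGet? (pvIdxs (l :: rest)) (n - 1)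
                = some ((pvIdxs rest)[k] + 1) := by
              rw [pvIdxs_cons, if_pos hl,
                show (n - 1 : Int) = ((k + 1 : Nat) : Int) by push_cast; omega,
                PySem.List.pyGet?_natCast]
              simp [hkr]
            have hget' : PySem.List.pyGet? (pvIdxs rest) (n - 1 - 1)
                = some ((pvIdxs rest)[k]) := by
              rw [show (n - 1 - 1 : Int) = ((k : Nat) : Int) by omega,
                PySem.List.pyGet?_natCast]
              simp [hkr]
            rw [hget, hget']
            have hv : 0 ≤ (pvIdxs rest)[k] :=
              pvIdxs_nonneg rest _ (List.getElem_mem hkr)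
            obtain ⟨v, hvv⟩ : ∃ v : Nat, ((v : Int)) = (pvIdxs rest)[k] := ⟨_, Int.toNat_of_nonneg hv⟩
            simp only [Option.getD_some]
            rw [show ((pvIdxs rest)[k] + 1 + 1 : Int) = ((v + 2 : Nat) : Int) by omega,
              show ((pvIdxs rest)[k] + 1 : Int) = ((v + 1 : Nat) : Int) by omega,
              PySem.List.slice_to_natCast, PySem.List.slice_to_natCast]
            simp [List.take_succ_cons]
      · rw [if_neg hl]
        have hlen : pvIdxs (l :: rest) = (pvIdxs rest).map (· + 1) := by
          rw [pvIdxs_cons, if_neg hl]; simp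
        rw [← ih n]
        simp only [pvAltCore, if_neg h0]
        by_cases hfew : ((pvIdxs rest).length : Int) < n
        · rw [if_pos (by rw [hlen]; simpa using hfew), if_pos hfew]
        · rw [if_neg (by rw [hlen]; simpa using hfew), if_neg hfew]
          obtain ⟨k, hk⟩ : ∃ k : Nat, (k : Int) = n - 1 := ⟨(n - 1).toNat, by omega⟩
          have hkr : k < (pvIdxs rest).length := by omega
          have hget : PySem.List.pyGet? (pvIdxs (l :: rest)) (n - 1)
              = some ((pvIdxs rest)[k] + 1) := by
            rw [hlen, ← hk, PySem.List.pyGet?_natCast]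
            simp [hkr]
          have hget' : PySem.List.pyGet? (pvIdxs rest) (n - 1)
              = some ((pvIdxs rest)[k]) := by
            rw [← hk, PySem.List.pyGet?_natCast]; simp [hkr]
          rw [hget, hget']
          have hv : 0 ≤ (pvIdxs rest)[k] :=
            pvIdxs_nonneg rest _ (List.getElem_mem hkr)
          obtain ⟨v, hvv⟩ : ∃ v : Nat, ((v : Int)) = (pvIdxs rest)[k] := ⟨_, Int.toNat_of_nonneg hv⟩
          simp only [Option.getD_some]
          rw [show ((pvIdxs rest)[k] + 1 + 1 : Int) = ((v + 2 : Nat) : Int) by omega,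
            show ((pvIdxs rest)[k] + 1 : Int) = ((v + 1 : Nat) : Int) by omega,
            PySem.List.slice_to_natCast, PySem.List.slice_to_natCast]
          simp [List.take_succ_cons]

-- ===== VERDICT (by name: the statement is the Claim_ definition above) =====
theorem get_n_lines_spec : Claim_equal_get_n_lines := by
  intro s n _
  unfold Spec_get_n_lines get_n_lines get_n_lines_alt
  rw [pvLoopA_eq_spec]
  show pvSpec ((PySem.Str.split? s "\n").getD []) (n - 0) = pvAltCore ((PySem.Str.split? s "\n").getD []) n
  rw [pvAltCore_eq_spec, sub_zero]
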